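-- pv_equiv track=rewrite | github.com/PashaSh0k/cmc_sem5 | ML/numpy-pandas-matplotlib/functions.py | max_prod_mod_3
-- ===== SOURCE A (Python) =====
-- from typing import List
--
-- def max_prod_mod_3(x: List[int]) -> int:
--     """
--     Вернуть максимальное прозведение соседних элементов в массиве x,
--     таких что хотя бы один множитель в произведении делится на 3.
--     Если таких произведений нет, то вернуть -1.
--     """
--
--     if len(x) < 2:
--         return -1
--     maxs = -1
--     for i in range(1, len(x) - 1):
--         if x[i] % 3 == 0:
--             m = max(x[i] * x[i-1], x[i] * x[i+1])
--             if m > maxs: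
--                 maxs = m
--     m = x[0] * x[1]
--     if m % 3 == 0 and m > maxs:
--         maxs = m
--     m = x[len(x) - 1] * x[len(x)-2]
--     if m % 3 == 0 and m > maxs:
--         maxs = m
--     return maxs
-- ===== SOURCE B (Python) =====
-- from typing import List
--
-- def max_prod_mod_3(x: List[int]) -> int:
--     if len(x) < 2:
--         return -1
--     maxs = -1
--     for j in range(len(x) - 1):
--         if x[j] % 3 == 0 or x[j + 1] % 3 == 0:
--             maxs = max(maxs, x[j] * x[j + 1])
--     return maxs
-- ===== Notes on version B (the rewrite author's own statement) =====
-- stated objective: simpler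
-- what changed: A's element-centric scan (for each interior element divisible by 3 take the max of its two neighbour products, then special-case the first and last pair via product-divisibility tests) is replaced by one uniform pass over adjacent pairs, each pair tested directly for a factor divisible by 3.
import Mathlib
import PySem

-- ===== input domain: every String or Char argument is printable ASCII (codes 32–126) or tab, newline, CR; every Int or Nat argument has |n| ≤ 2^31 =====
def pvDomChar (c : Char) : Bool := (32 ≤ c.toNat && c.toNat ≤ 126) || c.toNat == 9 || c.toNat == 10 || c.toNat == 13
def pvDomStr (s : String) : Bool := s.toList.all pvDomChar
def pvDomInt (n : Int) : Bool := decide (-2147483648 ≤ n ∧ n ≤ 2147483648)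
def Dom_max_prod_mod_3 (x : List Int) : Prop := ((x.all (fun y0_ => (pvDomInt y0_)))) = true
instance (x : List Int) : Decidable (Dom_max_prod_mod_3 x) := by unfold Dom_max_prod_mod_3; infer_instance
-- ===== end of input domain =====

-- B replaces A's element-centric scan (two products per divisible middle element plus two
-- end-pair special cases) by one uniform loop over adjacent pairs, each tested directly;
-- objective: simpler (same O(n) cost).

-- x[i] for an index that is always in range in both programs
def pvG (x : List Int) (i : Int) : Int := PySem.List.pyGetD x i 0

-- ===== PORT A =====
-- the two trailing 'm = x[a]*x[b]; if m % 3 == 0 and m > maxs: maxs = m' fix-ups of A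
def pvFixA (x : List Int) (i k maxs : Int) : Int :=
  if PySem.Int.mod (pvG x i * pvG x k) 3 = 0 ∧ pvG x i * pvG x k > maxs
  then pvG x i * pvG x k else maxs

-- A's loop body over the interior index i
def pvStepA (x : List Int) (maxs i : Int) : Int :=
  if PySem.Int.mod (pvG x i) 3 = 0 then
    if max (pvG x i * pvG x (i - 1)) (pvG x i * pvG x (i + 1)) > maxs
    then max (pvG x i * pvG x (i - 1)) (pvG x i * pvG x (i + 1))
    else maxs
  else maxs

def max_prod_mod_3 (x : List Int) : Int :=
  if (x.length : Int) < 2 then -1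
  else
    pvFixA x ((x.length : Int) - 1) ((x.length : Int) - 2)
      (pvFixA x 0 1
        ((PySem.List.pyRange 1 ((x.length : Int) - 1) 1).foldl (pvStepA x) (-1)))

-- ===== PORT B =====
-- B's loop body over the pair index j
def pvStepB (x : List Int) (maxs j : Int) : Int :=
  if PySem.Int.mod (pvG x j) 3 = 0 ∨ PySem.Int.mod (pvG x (j + 1)) 3 = 0 then
    max maxs (pvG x j * pvG x (j + 1))
  else maxs

def max_prod_mod_3_alt (x : List Int) : Int :=
  if (x.length : Int) < 2 then -1
  else (PySem.List.pyRange 0 ((x.length : Int) - 1) 1).foldl (pvStepB x) (-1)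

-- ===== PRECONDITION & SPEC =====
def Spec_max_prod_mod_3 (x : List Int) (out : Int) : Prop := out = max_prod_mod_3_alt x
instance (x : List Int) (out : Int) : Decidable (Spec_max_prod_mod_3 x out) := by unfold Spec_max_prod_mod_3; infer_instance

-- ===== CLAIM (what is proved, stated in full; the proofs are below) =====
def Claim_equal_max_prod_mod_3 : Prop := ∀ (x : List Int), Dom_max_prod_mod_3 x → Spec_max_prod_mod_3 x (max_prod_mod_3 x)

-- ===== LEMMAS AND PROOFS =====

-- A's loop contribution at index i, as an optional candidate value
def fA (x : List Int) (i : Int) : Option Int :=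
  if PySem.Int.mod (pvG x i) 3 = 0 then
    some (max (pvG x i * pvG x (i - 1)) (pvG x i * pvG x (i + 1)))
  else none

-- B's loop contribution at pair index j
def fB (x : List Int) (j : Int) : Option Int :=
  if PySem.Int.mod (pvG x j) 3 = 0 ∨ PySem.Int.mod (pvG x (j + 1)) 3 = 0 then
    some (pvG x j * pvG x (j + 1))
  else none

lemma stepA_eq (x : List Int) :
    (fun (a j : Int) => match fA x j with | some v => max a v | none => a) = pvStepA x := by
  funext a j
  by_cases h : PySem.Int.mod (pvG x j) 3 = 0
  · simp only [fA, pvStepA, if_pos h]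
    split_ifs with h2
    · exact max_eq_right h2.le
    · exact max_eq_left (not_lt.mp h2)
  · simp only [fA, pvStepA, if_neg h]

lemma stepB_eq (x : List Int) :
    (fun (a j : Int) => match fB x j with | some v => max a v | none => a) = pvStepB x := by
  funext a j
  by_cases h : PySem.Int.mod (pvG x j) 3 = 0 ∨ PySem.Int.mod (pvG x (j + 1)) 3 = 0
  · simp only [fB, pvStepB, if_pos h]
  · simp only [fB, pvStepB, if_neg h]

-- characterization of a 'running maximum over optional candidates' fold
lemma pv_foldl_max_opt (f : Int → Option Int) (l : List Int) (a0 : Int) :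
    a0 ≤ List.foldl (fun a j => match f j with | some v => max a v | none => a) a0 l ∧
    (∀ j ∈ l, ∀ v, f j = some v →
      v ≤ List.foldl (fun a j => match f j with | some v => max a v | none => a) a0 l) ∧
    (List.foldl (fun a j => match f j with | some v => max a v | none => a) a0 l = a0 ∨
      ∃ j ∈ l, f j = some (List.foldl (fun a j => match f j with | some v => max a v | none => a) a0 l)) := by
  induction l generalizing a0 with
  | nil => simp
  | cons hd tl ih =>
    simp only [List.foldl_cons]
    cases hf : f hd with
    | none =>
      obtain ⟨h1, h2, h3⟩ := ih a0
      refine ⟨h1, ?_, ?_⟩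
      · intro j hj v hv
        rcases List.mem_cons.mp hj with rfl | hj'
        · simp [hf] at hv
        · exact h2 j hj' v hv
      · rcases h3 with h | ⟨j, hj, hjv⟩
        · exact Or.inl h
        · exact Or.inr ⟨j, List.mem_cons_of_mem _ hj, hjv⟩
    | some v =>
      obtain ⟨h1, h2, h3⟩ := ih (max a0 v)
      refine ⟨le_trans (le_max_left a0 v) h1, ?_, ?_⟩
      · intro j hj w hw
        rcases List.mem_cons.mp hj with rfl | hj'
        · rw [hf] at hw
          obtain rfl : v = w := Option.some.inj hw
          exact le_trans (le_max_right a0 v) h1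
        · exact h2 j hj' w hw
      · rcases h3 with h | ⟨j, hj, hjv⟩
        · rcases max_choice a0 v with hm | hm
          · exact Or.inl (h.trans hm)
          · exact Or.inr ⟨hd, List.mem_cons_self, by rw [hf, h, hm]⟩
        · exact Or.inr ⟨j, List.mem_cons_of_mem _ hj, hjv⟩

lemma pvFixA_spec (x : List Int) (i k maxs : Int) :
    maxs ≤ pvFixA x i k maxs ∧
    (PySem.Int.mod (pvG x i * pvG x k) 3 = 0 → pvG x i * pvG x k ≤ pvFixA x i k maxs) ∧
    (pvFixA x i k maxs = maxs ∨
      (pvFixA x i k maxs = pvG x i * pvG x k ∧ PySem.Int.mod (pvG x i * pvG x k) 3 = 0)) := by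
  unfold pvFixA
  split_ifs with h
  · exact ⟨h.2.le, fun _ => le_refl _, Or.inr ⟨rfl, h.1⟩⟩
  · exact ⟨le_refl _, fun hc => not_lt.mp (fun hlt => h ⟨hc, hlt⟩), Or.inl rfl⟩

lemma pv_dvd_split (a b : Int) (h : PySem.Int.mod (a * b) 3 = 0) :
    PySem.Int.mod a 3 = 0 ∨ PySem.Int.mod b 3 = 0 := by
  rw [PySem.Int.mod_eq_zero_iff_dvd] at h
  rw [PySem.Int.mod_eq_zero_iff_dvd, PySem.Int.mod_eq_zero_iff_dvd]
  exact (Int.prime_three.dvd_mul).mp h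

lemma pvB_pair_le (x : List Int) (rB : Int)
    (hB2 : ∀ j ∈ PySem.List.pyRange 0 ((x.length : Int) - 1) 1, ∀ v, fB x j = some v → v ≤ rB)
    (j : Int) (h0 : 0 ≤ j) (h1 : j < (x.length : Int) - 1)
    (hd : PySem.Int.mod (pvG x j) 3 = 0 ∨ PySem.Int.mod (pvG x (j + 1)) 3 = 0) :
    pvG x j * pvG x (j + 1) ≤ rB := by
  exact hB2 j (by rw [PySem.List.mem_pyRange_one]; exact ⟨h0, h1⟩) _ (by unfold fB; rw [if_pos hd])

lemma pvA_pair_le (x : List Int) (rA0 : Int)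
    (hA2 : ∀ i ∈ PySem.List.pyRange 1 ((x.length : Int) - 1) 1, ∀ v, fA x i = some v → v ≤ rA0)
    (i : Int) (h0 : 1 ≤ i) (h1 : i < (x.length : Int) - 1)
    (hd : PySem.Int.mod (pvG x i) 3 = 0) :
    pvG x i * pvG x (i - 1) ≤ rA0 ∧ pvG x i * pvG x (i + 1) ≤ rA0 := by
  have h := hA2 i (by rw [PySem.List.mem_pyRange_one]; exact ⟨h0, h1⟩) _
    (by unfold fA; rw [if_pos hd])
  exact ⟨le_trans (le_max_left _ _) h, le_trans (le_max_right _ _) h⟩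

lemma pv_core (x : List Int) (hn : 2 ≤ (x.length : Int)) (rA0 rB : Int)
    (hA1 : -1 ≤ rA0)
    (hA2 : ∀ j ∈ PySem.List.pyRange 1 ((x.length : Int) - 1) 1, ∀ v, fA x j = some v → v ≤ rA0)
    (hA3 : rA0 = -1 ∨ ∃ j ∈ PySem.List.pyRange 1 ((x.length : Int) - 1) 1, fA x j = some rA0)
    (hB1 : -1 ≤ rB)
    (hB2 : ∀ j ∈ PySem.List.pyRange 0 ((x.length : Int) - 1) 1, ∀ v, fB x j = some v → v ≤ rB)
    (hB3 : rB = -1 ∨ ∃ j ∈ PySem.List.pyRange 0 ((x.length : Int) - 1) 1, fB x j = some rB) :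
    pvFixA x ((x.length : Int) - 1) ((x.length : Int) - 2) (pvFixA x 0 1 rA0) = rB := by
  obtain ⟨h1a, h1b, h1c⟩ := pvFixA_spec x 0 1 rA0
  obtain ⟨h2a, h2b, h2c⟩ := pvFixA_spec x ((x.length : Int) - 1) ((x.length : Int) - 2) (pvFixA x 0 1 rA0)
  have hR0fin : rA0 ≤ pvFixA x ((x.length : Int) - 1) ((x.length : Int) - 2) (pvFixA x 0 1 rA0) :=
    le_trans h1a h2a
  have hrA0_le : rA0 ≤ rB := by
    rcases hA3 with h | ⟨j, hj, hjv⟩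
    · rw [h]; exact hB1
    · rw [PySem.List.mem_pyRange_one] at hj
      unfold fA at hjv
      split_ifs at hjv with hcj
      · have hv := Option.some.inj hjv
        rw [← hv]
        apply max_le
        · have hp := pvB_pair_le x rB hB2 (j - 1) (by omega) (by omega)
            (Or.inr (by rw [show j - 1 + 1 = j from by ring]; exact hcj))
          rw [show j - 1 + 1 = j from by ring] at hp
          calc pvG x j * pvG x (j - 1) = pvG x (j - 1) * pvG x j := mul_comm _ _
            _ ≤ rB := hp
        · exact pvB_pair_le x rB hB2 j (by omega) hj.2 (Or.inl hcj)
  apply le_antisymm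
  · rcases h2c with h2 | ⟨h2, hc2⟩
    · rw [h2]
      rcases h1c with h1 | ⟨h1, hc1⟩
      · rw [h1]; exact hrA0_le
      · rw [h1]
        have hd := pv_dvd_split (pvG x 0) (pvG x 1) hc1
        have hp := pvB_pair_le x rB hB2 0 le_rfl (by omega) (by simpa using hd)
        simpa using hp
    · rw [h2]
      have hd := pv_dvd_split (pvG x ((x.length : Int) - 1)) (pvG x ((x.length : Int) - 2)) hc2
      have hp := pvB_pair_le x rB hB2 ((x.length : Int) - 2) (by omega) (by omega)
        (by rw [show ((x.length : Int) - 2) + 1 = (x.length : Int) - 1 from by ring]; tauto)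
      rw [show ((x.length : Int) - 2) + 1 = (x.length : Int) - 1 from by ring] at hp
      calc pvG x ((x.length : Int) - 1) * pvG x ((x.length : Int) - 2)
          = pvG x ((x.length : Int) - 2) * pvG x ((x.length : Int) - 1) := mul_comm _ _
        _ ≤ rB := hp
  · rcases hB3 with h | ⟨j, hj, hjv⟩
    · rw [h]; exact le_trans hA1 hR0fin
    · rw [PySem.List.mem_pyRange_one] at hj
      unfold fB at hjv
      split_ifs at hjv with hcj
      · have hv := Option.some.inj hjv
        rw [← hv]
        rcases hcj with hdl | hdr
        · by_cases hj0 : j = 0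
          · subst hj0
            have hc1 : PySem.Int.mod (pvG x 0 * pvG x 1) 3 = 0 := by
              rw [PySem.Int.mod_eq_zero_iff_dvd] at hdl ⊢
              exact hdl.mul_right _
            have hp := le_trans (h1b hc1) h2a
            simpa using hp
          · have hp := (pvA_pair_le x rA0 hA2 j (by omega) hj.2 hdl).2
            exact le_trans hp hR0fin
        · by_cases hjl : j = (x.length : Int) - 2
          · subst hjl
            rw [show ((x.length : Int) - 2) + 1 = (x.length : Int) - 1 from by ring] at hdr ⊢
            have hc2 : PySem.Int.mod (pvG x ((x.length : Int) - 1) * pvG x ((x.length : Int) - 2)) 3 = 0 := by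
              rw [PySem.Int.mod_eq_zero_iff_dvd] at hdr ⊢
              exact hdr.mul_right _
            calc pvG x ((x.length : Int) - 2) * pvG x ((x.length : Int) - 1)
                = pvG x ((x.length : Int) - 1) * pvG x ((x.length : Int) - 2) := mul_comm _ _
              _ ≤ _ := h2b hc2
          · have hp := (pvA_pair_le x rA0 hA2 (j + 1) (by omega) (by omega) hdr).1
            rw [show j + 1 - 1 = j from by ring] at hp
            calc pvG x j * pvG x (j + 1) = pvG x (j + 1) * pvG x j := mul_comm _ _
              _ ≤ rA0 := hp
              _ ≤ _ := hR0fin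

lemma pv_main (x : List Int) : max_prod_mod_3 x = max_prod_mod_3_alt x := by
  unfold max_prod_mod_3 max_prod_mod_3_alt
  by_cases hn : (x.length : Int) < 2
  · rw [if_pos hn, if_pos hn]
  · rw [if_neg hn, if_neg hn]
    obtain ⟨hA1, hA2, hA3⟩ := pv_foldl_max_opt (fA x) (PySem.List.pyRange 1 ((x.length : Int) - 1) 1) (-1)
    obtain ⟨hB1, hB2, hB3⟩ := pv_foldl_max_opt (fB x) (PySem.List.pyRange 0 ((x.length : Int) - 1) 1) (-1)
    rw [stepA_eq x] at hA1 hA2 hA3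
    rw [stepB_eq x] at hB1 hB2 hB3
    exact pv_core x (by omega) _ _ hA1 hA2 hA3 hB1 hB2 hB3

-- ===== VERDICT (by name: the statement is the Claim_ definition above) =====
theorem max_prod_mod_3_spec : Claim_equal_max_prod_mod_3 := by
  intro x _
  show max_prod_mod_3 x = max_prod_mod_3_alt x
  exact pv_main x
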